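-- pv_equiv track=rewrite | github.com/scondo-prof/theToolKit | funEndeavors/un_char_shifter.py | new_char
-- ===== SOURCE A (Python) =====
-- def new_char(input_char_integer: int, shifter: int):
--     valid_char_integers = [
--         48,
--         49,
--         50,
--         51,
--         52,
--         53,
--         54,
--         55,
--         56,
--         57,
--         65,
--         66,
--         67,
--         68,
--         69,
--         70,
--         71,
--         72,
--         73,
--         74,
--         75,
--         76,
--         77,
--         78,
--         79,
--         80,
--         81,
--         82,
--         83,
--         84,
--         85,
--         86,
--         87,
--         88,
--         89,
--         90,
--         97,
--         98,
--         99,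
--         100,
--         101,
--         102,
--         103,
--         104,
--         105,
--         106,
--         107,
--         108,
--         109,
--         110,
--         111,
--         112,
--         113,
--         114,
--         115,
--         116,
--         117,
--         118,
--         119,
--         120,
--         121,
--         122,
--     ]
--
--     if input_char_integer in valid_char_integers:
--         index = 0
--         for char_integer in valid_char_integers:
--             if input_char_integer == char_integer:
--                 break
--             index += 1
--
--         new_char_index = index - shifter
--         new_char = chr(valid_char_integers[new_char_index % 62])
--
--         return new_char
--     else:
--         return chr(input_char_integer)
-- ===== SOURCE B (Python) =====
-- def new_char(input_char_integer: int, shifter: int):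
--     c = input_char_integer
--     if 48 <= c <= 57:
--         index = c - 48
--     elif 65 <= c <= 90:
--         index = c - 55
--     elif 97 <= c <= 122:
--         index = c - 61
--     else:
--         return chr(c)
--     t = (index - shifter) % 62
--     if t < 10:
--         return chr(48 + t)
--     elif t < 36:
--         return chr(55 + t)
--     else:
--         return chr(61 + t)
-- ===== Notes on version B (the rewrite author's own statement) =====
-- stated objective: simpler
-- what changed: Replaces the 62-element table, the linear membership test and the index-hunting loop with closed-form range arithmetic: the index is computed directly from the code point, shifted mod 62, and mapped back by range offsets.
import Mathlib
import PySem

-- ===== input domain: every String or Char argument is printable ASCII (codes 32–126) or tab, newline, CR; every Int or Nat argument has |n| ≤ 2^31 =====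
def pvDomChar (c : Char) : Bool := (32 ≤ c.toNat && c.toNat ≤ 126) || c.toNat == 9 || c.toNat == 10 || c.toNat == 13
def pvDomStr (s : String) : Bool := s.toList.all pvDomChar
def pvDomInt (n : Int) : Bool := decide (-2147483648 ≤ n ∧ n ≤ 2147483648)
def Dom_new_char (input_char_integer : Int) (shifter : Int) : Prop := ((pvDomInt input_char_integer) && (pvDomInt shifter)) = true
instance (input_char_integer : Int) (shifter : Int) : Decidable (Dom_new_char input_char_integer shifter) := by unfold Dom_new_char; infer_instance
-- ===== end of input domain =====

-- B replaces A's 62-element table, membership scan and index-hunting loop with closed-form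
-- range arithmetic (objective: simpler).

-- chr(n) for a valid Unicode scalar value (Pre_ guarantees validity)
def pvChr (n : Int) : String := String.mk [Char.ofNat n.toNat]

-- ===== PORT A =====
def pvValid : List Int :=
  [48, 49, 50, 51, 52, 53, 54, 55, 56, 57,
   65, 66, 67, 68, 69, 70, 71, 72, 73, 74, 75, 76, 77, 78, 79, 80,
   81, 82, 83, 84, 85, 86, 87, 88, 89, 90,
   97, 98, 99, 100, 101, 102, 103, 104, 105, 106, 107, 108, 109, 110,
   111, 112, 113, 114, 115, 116, 117, 118, 119, 120, 121, 122]

-- the for-loop with break: walk the table, stop at the first match, count steps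
def pvIndexLoop : List Int → Int → Int → Int
  | [], _, idx => idx
  | x :: xs, c, idx => if c = x then idx else pvIndexLoop xs c (idx + 1)

def new_char (input_char_integer : Int) (shifter : Int) : String :=
  if pvValid.contains input_char_integer then
    let index := pvIndexLoop pvValid input_char_integer 0
    let new_char_index := index - shifter
    pvChr ((PySem.List.pyGet? pvValid (PySem.Int.mod new_char_index 62)).getD 0)
  else
    pvChr input_char_integer

-- ===== PORT B =====
def pvShift (index : Int) (shifter : Int) : String :=
  let t := PySem.Int.mod (index - shifter) 62
  if t < 10 then pvChr (48 + t)
  else if t < 36 then pvChr (55 + t)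
  else pvChr (61 + t)

def new_char_alt (input_char_integer : Int) (shifter : Int) : String :=
  if 48 ≤ input_char_integer ∧ input_char_integer ≤ 57 then
    pvShift (input_char_integer - 48) shifter
  else if 65 ≤ input_char_integer ∧ input_char_integer ≤ 90 then
    pvShift (input_char_integer - 55) shifter
  else if 97 ≤ input_char_integer ∧ input_char_integer ≤ 122 then
    pvShift (input_char_integer - 61) shifter
  else
    pvChr input_char_integer

-- ===== PRECONDITION & SPEC =====
-- Pre_ excludes inputs where Python's chr raises ValueError (codes outside range(0x110000))
-- and the surrogate codes 0xD800–0xDFFF, whose chr() result is not a valid Unicode string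
-- (not representable as a Lean String); both programs behave identically there in Python.
def Pre_new_char (input_char_integer : Int) (shifter : Int) : Prop :=
  0 ≤ input_char_integer ∧ input_char_integer < 1114112 ∧
  ¬(55296 ≤ input_char_integer ∧ input_char_integer ≤ 57343)
instance (input_char_integer : Int) (shifter : Int) : Decidable (Pre_new_char input_char_integer shifter) := by
  unfold Pre_new_char; infer_instance

def pvWitness_new_char : Int × Int := (48, 3)

def Spec_new_char (input_char_integer : Int) (shifter : Int) (out : String) : Prop := out = new_char_alt input_char_integer shifter
instance (input_char_integer : Int) (shifter : Int) (out : String) : Decidable (Spec_new_char input_char_integer shifter out) := by unfold Spec_new_char; infer_instance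

-- ===== CLAIM (what is proved, stated in full; the proofs are below) =====
def Claim_equal_new_char : Prop := ∀ (input_char_integer : Int) (shifter : Int), Dom_new_char input_char_integer shifter → Pre_new_char input_char_integer shifter → Spec_new_char input_char_integer shifter (new_char input_char_integer shifter)

-- ===== LEMMAS AND PROOFS =====

-- the table at position m (0 ≤ m < 62) is exactly B's closed form
theorem pvTable_lookup (m : Int) (h0 : 0 ≤ m) (h1 : m < 62) :
    (PySem.List.pyGet? pvValid m).getD 0 =
      if m < 10 then 48 + m else if m < 36 then 55 + m else 61 + m := by
  interval_cases m <;> decide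

-- A's table lookup at the shifted index equals B's pvShift
theorem pvKey (idx shifter : Int) :
    pvChr ((PySem.List.pyGet? pvValid (PySem.Int.mod (idx - shifter) 62)).getD 0) =
      pvShift idx shifter := by
  have h0 := PySem.Int.mod_nonneg (idx - shifter) (by norm_num : (0:Int) < 62)
  have h1 := PySem.Int.mod_lt (idx - shifter) (by norm_num : (0:Int) < 62)
  unfold pvShift
  rw [pvTable_lookup _ h0 h1]
  dsimp only
  split_ifs <;> rfl

-- A's index-hunting loop, evaluated on each of the three ranges
theorem pvIdx_digit (c : Int) (h1 : 48 ≤ c) (h2 : c ≤ 57) :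
    pvIndexLoop pvValid c 0 = c - 48 := by
  interval_cases c <;> decide

theorem pvIdx_upper (c : Int) (h1 : 65 ≤ c) (h2 : c ≤ 90) :
    pvIndexLoop pvValid c 0 = c - 55 := by
  interval_cases c <;> decide

theorem pvIdx_lower (c : Int) (h1 : 97 ≤ c) (h2 : c ≤ 122) :
    pvIndexLoop pvValid c 0 = c - 61 := by
  interval_cases c <;> decide

-- the three closed-form ranges imply table membership
theorem pvMem_of_range (c : Int)
    (h : (48 ≤ c ∧ c ≤ 57) ∨ (65 ≤ c ∧ c ≤ 90) ∨ (97 ≤ c ∧ c ≤ 122)) :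
    pvValid.contains c = true := by
  rcases h with ⟨h1, h2⟩ | ⟨h1, h2⟩ | ⟨h1, h2⟩ <;> interval_cases c <;> decide

-- table membership implies one of the three ranges
theorem pvRange_of_mem (c : Int) (hc : pvValid.contains c = true) :
    (48 ≤ c ∧ c ≤ 57) ∨ (65 ≤ c ∧ c ≤ 90) ∨ (97 ≤ c ∧ c ≤ 122) := by
  have h : c ∈ pvValid := by simpa using hc
  simp [pvValid] at h
  omega

-- ===== VERDICT (by name: the statement is the Claim_ definition above) =====
theorem new_char_spec : Claim_equal_new_char := by
  intro c s _ _
  unfold Spec_new_char new_char new_char_alt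
  by_cases hc : pvValid.contains c = true
  · rw [if_pos hc]
    rcases pvRange_of_mem c hc with ⟨h1, h2⟩ | ⟨h1, h2⟩ | ⟨h1, h2⟩
    · rw [pvIdx_digit c h1 h2, if_pos ⟨h1, h2⟩]
      exact pvKey _ s
    · rw [pvIdx_upper c h1 h2, if_neg (by omega), if_pos ⟨h1, h2⟩]
      exact pvKey _ s
    · rw [pvIdx_lower c h1 h2, if_neg (by omega), if_neg (by omega), if_pos ⟨h1, h2⟩]
      exact pvKey _ s
  · have h1 : ¬(48 ≤ c ∧ c ≤ 57) := fun h => hc (pvMem_of_range c (Or.inl h))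
    have h2 : ¬(65 ≤ c ∧ c ≤ 90) := fun h => hc (pvMem_of_range c (Or.inr (Or.inl h)))
    have h3 : ¬(97 ≤ c ∧ c ≤ 122) := fun h => hc (pvMem_of_range c (Or.inr (Or.inr h)))
    rw [if_neg hc, if_neg h1, if_neg h2, if_neg h3]
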